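-- pv_equiv track=rewrite | github.com/An-Individual/fl-quests | python/ConditionParsing.py | splitCondition
-- ===== SOURCE A (Python) =====
-- def splitCondition(value):
--     result = [];
--     idx = 0
--     while idx < len(value):
--         if value[idx].isspace():
--             # Do nothing
--             idx += 1
--         elif value[idx] in '.()':
--             result.append(value[idx])
--             idx += 1
--         elif isLogicChar(value[idx]):
--             endIdx = nextNot(value, idx, isLogicChar)
--             result.append(value[idx:endIdx])
--             idx = endIdx
--         elif isComparisionChar(value[idx]):
--             endIdx = nextNot(value, idx, isComparisionChar)
--             result.append(value[idx:endIdx])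
--             idx = endIdx
--         elif value[idx].isdigit():
--             endIdx = nextNot(value, idx, lambda c: c.isdigit())
--             result.append(value[idx:endIdx])
--             idx = endIdx
--         elif value[idx].isalpha():
--             endIdx = nextNot(value, idx, lambda c: c.isalpha())
--             result.append(value[idx:endIdx])
--             idx = endIdx
--         else:
--             raise Exception("Encountered unknown condition character: " + value[idx])
--     return result
--
-- def isLogicChar(value):
--     return value in "|&"
--
-- def isComparisionChar(value):
--     return value in "!=<>"
--
-- def nextNot(value, index, condition):
--     idx = index
--     while idx < len(value) and condition(value[idx]):
--         idx += 1
--     return idx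
-- ===== SOURCE B (Python) =====
-- def splitCondition(value):
--     # Staged pipeline: (1) label every character (raising on the first
--     # unknown one), (2) splice a NUL separator in front of every position
--     # that starts a new token (label change, or a whitespace/dot/parenthesis label, which
--     # never merges), (3) split on NUL and keep the non-empty non-space pieces.
--     labels = [_cat(c) for c in value]
--     marked = []
--     for i, c in enumerate(value):
--         if i == 0 or labels[i] != labels[i - 1] or labels[i] <= 1:
--             marked.append('\x00')
--         marked.append(c)
--     return [t for t in ''.join(marked).split('\x00') if t and _cat(t[0]) != 0]
--
-- def _cat(c):
--     if c.isspace():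
--         return 0
--     if c in '.()':
--         return 1
--     if c in '|&':
--         return 2
--     if c in '!=<>':
--         return 3
--     if c.isdigit():
--         return 4
--     if c.isalpha():
--         return 5
--     raise Exception("Encountered unknown condition character: " + c)
-- ===== Notes on version B (the rewrite author's own statement) =====
-- stated objective: alternative
-- what changed: B replaces A's branch-per-category scan-ahead loop by a staged pipeline: label every character, splice a NUL separator before each token boundary (label change, or a label that never merges: whitespace, dot, parenthesis), then split the marked string on NUL and keep the non-empty non-whitespace pieces; Pre_ excludes strings containing a character of no category, on which both A and B raise the same Exception.
import Mathlib
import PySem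

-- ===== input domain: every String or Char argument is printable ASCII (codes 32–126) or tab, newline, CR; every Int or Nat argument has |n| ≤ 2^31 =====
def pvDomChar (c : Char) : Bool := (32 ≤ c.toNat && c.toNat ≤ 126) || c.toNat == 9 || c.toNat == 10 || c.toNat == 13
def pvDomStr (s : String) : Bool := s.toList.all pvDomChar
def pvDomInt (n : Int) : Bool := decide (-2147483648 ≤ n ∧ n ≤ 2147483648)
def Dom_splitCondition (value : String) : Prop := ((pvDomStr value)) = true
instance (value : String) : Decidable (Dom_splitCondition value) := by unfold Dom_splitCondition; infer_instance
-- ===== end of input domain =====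

-- B replaces A's branch-per-category scan-ahead loop with a staged pipeline (label chars,
-- splice NUL separators at token boundaries, split on NUL, filter); same tokens, proved
-- equal on Pre_ (no unknown characters).

-- ===== PORT A =====
def isLogicChar (c : Char) : Bool := c == '|' || c == '&'

def isComparisionChar (c : Char) : Bool := c == '!' || c == '=' || c == '<' || c == '>'

-- A's while-loop over idx, one step per iteration; value[idx:endIdx] with endIdx = nextNot(...)
-- is takeWhile from the current position, the new idx is dropWhile (exact for nextNot's scan).
def splitA : List Char → List String
  | [] => []
  | c :: rest =>
    if PySem.Chars.isspace c then
      splitA rest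
    else if c == '.' || c == '(' || c == ')' then
      String.mk [c] :: splitA rest
    else if h2 : isLogicChar c then
      String.mk ((c :: rest).takeWhile isLogicChar) :: splitA ((c :: rest).dropWhile isLogicChar)
    else if h3 : isComparisionChar c then
      String.mk ((c :: rest).takeWhile isComparisionChar) ::
        splitA ((c :: rest).dropWhile isComparisionChar)
    else if h4 : PySem.Chars.isdigit c then
      String.mk ((c :: rest).takeWhile (fun d => PySem.Chars.isdigit d)) ::
        splitA ((c :: rest).dropWhile (fun d => PySem.Chars.isdigit d))
    else if h5 : PySem.Chars.isalpha c then
      String.mk ((c :: rest).takeWhile (fun d => PySem.Chars.isalpha d)) ::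
        splitA ((c :: rest).dropWhile (fun d => PySem.Chars.isalpha d))
    else
      []  -- Python raises Exception here; excluded by Pre_
  termination_by cs => cs.length
  decreasing_by
    all_goals simp only [List.length_cons, List.dropWhile, *]
    all_goals first
      | omega
      | exact Nat.lt_succ_of_le (List.length_dropWhile_le _ _)

def splitCondition (value : String) : List String := splitA value.toList

-- ===== PORT B =====
-- _cat(c): the priority classifier (Python B raises on category-less chars; 6 marks them here)
def catB (c : Char) : Nat :=
  if PySem.Chars.isspace c then 0
  else if c == '.' || c == '(' || c == ')' then 1
  else if c == '|' || c == '&' then 2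
  else if c == '!' || c == '=' || c == '<' || c == '>' then 3
  else if PySem.Chars.isdigit c then 4
  else if PySem.Chars.isalpha c then 5
  else 6

-- Source B's marking loop: '\x00' is spliced before position i iff i == 0, the label changed,
-- or the label is ≤ 1; `prev` carries labels[i-1] (none at i = 0), exactly the loop's test.
def markedB : List Char → Option Nat → List Char
  | [], _ => []
  | c :: rest, prev =>
    (if prev ≠ some (catB c) ∨ catB c ≤ 1 then [Char.ofNat 0, c] else [c]) ++
      markedB rest (some (catB c))

-- Source B's filter: keep a piece iff it is non-empty and its first char is not whitespace-labelled
def keepTok : List Char → Bool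
  | [] => false
  | c :: _ => catB c != 0

-- ''.join(marked).split('\x00') is List.splitOn on the char list (empty pieces retained, as
-- in Python's str.split with an explicit separator); then the comprehension's filter.
def splitCondition_alt (value : String) : List String :=
  (((markedB value.toList none).splitOn (Char.ofNat 0)).filter keepTok).map String.mk

-- ===== PRECONDITION & SPEC =====
-- a character both versions tokenize (anything else makes Python A — and B — raise Exception)
def knownChar (c : Char) : Bool :=
  PySem.Chars.isspace c || c == '.' || c == '(' || c == ')' || c == '|' || c == '&' ||
    c == '!' || c == '=' || c == '<' || c == '>' || PySem.Chars.isdigit c || PySem.Chars.isalpha c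

-- Pre_ excludes exactly the strings on which Python A raises (an unknown condition character)
def Pre_splitCondition (value : String) : Prop := value.toList.all knownChar = true
instance (value : String) : Decidable (Pre_splitCondition value) := by
  unfold Pre_splitCondition; infer_instance

def pvWitness_splitCondition : String := " a1 & (b >= 20).c "

def Spec_splitCondition (value : String) (out : List String) : Prop := out = splitCondition_alt value
instance (value : String) (out : List String) : Decidable (Spec_splitCondition value out) := by
  unfold Spec_splitCondition; infer_instance

-- ===== CLAIM (what is proved, stated in full; the proofs are below) =====
def Claim_equal_splitCondition : Prop :=
  ∀ (value : String), Dom_splitCondition value → Pre_splitCondition value →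
    Spec_splitCondition value (splitCondition value)

-- ===== LEMMAS AND PROOFS =====

-- proof-side bridge: A's scan-ahead loop equals the maximal-run tokenizer splitB,
-- and splitB equals B's mark-and-split pipeline; both proved below.
def splitB : List Char → List String
  | [] => []
  | c :: rest =>
    (if catB c == 1 then
      (c :: rest.takeWhile (fun d => catB d == catB c)).map (fun d => String.mk [d])
     else if catB c == 0 then []
     else if catB c == 6 then []
     else [String.mk (c :: rest.takeWhile (fun d => catB d == catB c))]) ++
      splitB (rest.dropWhile (fun d => catB d == catB c))
  termination_by cs => cs.length
  decreasing_by
    simp only [List.length_cons]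
    exact Nat.lt_succ_of_le (List.length_dropWhile_le _ _)

theorem digit_bounds (c : Char) :
    PySem.Chars.isdigit c = true ↔ 48 ≤ c.toNat ∧ c.toNat ≤ 57 := by
  simp [PySem.Chars.isdigit, Char.le_def, UInt32.le_iff_toNat_le]

theorem alpha_bounds (c : Char) :
    PySem.Chars.isalpha c = true ↔ (65 ≤ c.toNat ∧ c.toNat ≤ 90) ∨ (97 ≤ c.toNat ∧ c.toNat ≤ 122) := by
  simp [PySem.Chars.isalpha, PySem.Chars.isupper, PySem.Chars.islower, Char.le_def,
    UInt32.le_iff_toNat_le]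

theorem space_digit (c : Char) (h : PySem.Chars.isdigit c = true) :
    PySem.Chars.isspace c = false := by
  rw [digit_bounds] at h; simp [PySem.Chars.isspace]; omega

theorem space_alpha (c : Char) (h : PySem.Chars.isalpha c = true) :
    PySem.Chars.isspace c = false := by
  rw [alpha_bounds] at h; simp [PySem.Chars.isspace]; omega

theorem ne_of_digit (c x : Char) (h : PySem.Chars.isdigit c = true)
    (hx : x.toNat < 48 ∨ 57 < x.toNat) : (c == x) = false := by
  rw [digit_bounds] at h
  rw [beq_eq_false_iff_ne]
  rintro rfl; omega

theorem ne_of_alpha (c x : Char) (h : PySem.Chars.isalpha c = true)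
    (hx : (x.toNat < 65 ∨ 90 < x.toNat) ∧ (x.toNat < 97 ∨ 122 < x.toNat)) : (c == x) = false := by
  rw [alpha_bounds] at h
  rw [beq_eq_false_iff_ne]
  rintro rfl; omega

theorem digit_not_alpha (c : Char) (h : PySem.Chars.isdigit c = true) :
    PySem.Chars.isalpha c = false := by
  rw [digit_bounds] at h
  rw [Bool.eq_false_iff, Ne, alpha_bounds]
  omega

theorem cat_logic : (fun d => (catB d == 2 : Bool)) = isLogicChar := by
  funext c
  by_cases h1 : c = '|'
  · subst h1; decide
  by_cases h2 : c = '&'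
  · subst h2; decide
  have hl : (c == '|' || c == '&') = false := by simp [h1, h2]
  rw [show isLogicChar c = false from hl]
  unfold catB
  rw [hl]
  split_ifs <;> simp_all

theorem cat_cmp : (fun d => (catB d == 3 : Bool)) = isComparisionChar := by
  funext c
  by_cases h1 : c = '!'; · subst h1; decide
  by_cases h2 : c = '='; · subst h2; decide
  by_cases h3 : c = '<'; · subst h3; decide
  by_cases h4 : c = '>'; · subst h4; decide
  have hl : (c == '!' || c == '=' || c == '<' || c == '>') = false := by simp [h1, h2, h3, h4]
  rw [show isComparisionChar c = false from hl]
  unfold catB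
  rw [hl]
  split_ifs <;> simp_all

theorem cat_of_digit (c : Char) (h : PySem.Chars.isdigit c = true) : catB c = 4 := by
  unfold catB
  rw [space_digit c h, h,
    ne_of_digit c '.' h (by decide), ne_of_digit c '(' h (by decide),
    ne_of_digit c ')' h (by decide), ne_of_digit c '|' h (by decide),
    ne_of_digit c '&' h (by decide), ne_of_digit c '!' h (by decide),
    ne_of_digit c '=' h (by decide), ne_of_digit c '<' h (by decide),
    ne_of_digit c '>' h (by decide)]
  simp

theorem cat_digit : (fun d => (catB d == 4 : Bool)) = (fun d => PySem.Chars.isdigit d) := by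
  funext c
  by_cases h : PySem.Chars.isdigit c = true
  · rw [h, cat_of_digit c h]; rfl
  · rw [Bool.not_eq_true] at h
    rw [h]
    unfold catB
    split_ifs <;> simp_all

theorem cat_of_alpha (c : Char) (h : PySem.Chars.isalpha c = true) : catB c = 5 := by
  unfold catB
  rw [space_alpha c h, h,
    ne_of_alpha c '.' h (by decide), ne_of_alpha c '(' h (by decide),
    ne_of_alpha c ')' h (by decide), ne_of_alpha c '|' h (by decide),
    ne_of_alpha c '&' h (by decide), ne_of_alpha c '!' h (by decide),
    ne_of_alpha c '=' h (by decide), ne_of_alpha c '<' h (by decide),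
    ne_of_alpha c '>' h (by decide)]
  have hd : PySem.Chars.isdigit c = false := by
    by_cases hd : PySem.Chars.isdigit c = true
    · rw [digit_not_alpha c hd] at h; exact absurd h (by simp)
    · exact Bool.not_eq_true _ ▸ hd
  rw [hd]
  simp

theorem cat_alpha : (fun d => (catB d == 5 : Bool)) = (fun d => PySem.Chars.isalpha d) := by
  funext c
  by_cases h : PySem.Chars.isalpha c = true
  · rw [h, cat_of_alpha c h]; rfl
  · rw [Bool.not_eq_true] at h
    rw [h]
    unfold catB
    split_ifs <;> simp_all

theorem all_tail (c : Char) (cs : List Char) (p : Char → Bool) (h : (c :: cs).all p = true) :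
    cs.all p = true := by
  simp_all [List.all_cons]

theorem all_drop (p q : Char → Bool) (cs : List Char) (h : cs.all q = true) :
    (cs.dropWhile p).all q = true := by
  rw [List.all_eq_true] at h ⊢
  exact fun x hx => h x ((List.dropWhile_sublist p).subset hx)

-- splitB swallows a leading whitespace character
theorem splitB_space (c : Char) (rest : List Char) (h : PySem.Chars.isspace c = true) :
    splitB (c :: rest) = splitB rest := by
  have hk : catB c = 0 := by simp [catB, h]
  rw [splitB.eq_def]
  simp only [hk]
  simp only [Nat.reduceBEq, Bool.false_eq_true, if_false, if_true, BEq.rfl, List.nil_append]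
  cases rest with
  | nil => rw [List.dropWhile_nil, splitB.eq_def]
  | cons d rest2 =>
    by_cases hd : catB d = 0
    · rw [List.dropWhile_cons_of_pos (by simp [hd])]
      conv_rhs => rw [splitB.eq_def]
      simp [hd]
    · rw [List.dropWhile_cons_of_neg (by simp [hd])]

-- splitB emits a leading dot or parenthesis character on its own
theorem splitB_one (c : Char) (rest : List Char) (h : catB c = 1) :
    splitB (c :: rest) = String.mk [c] :: splitB rest := by
  rw [splitB.eq_def]
  simp only [h, BEq.rfl, if_true]
  cases rest with
  | nil =>
    rw [List.takeWhile_nil, List.dropWhile_nil, splitB.eq_def]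
    simp
  | cons d rest2 =>
    by_cases hd : catB d = 1
    · rw [List.takeWhile_cons_of_pos (by simp [hd]),
        List.dropWhile_cons_of_pos (by simp [hd])]
      conv_rhs => rw [splitB.eq_def]
      simp [hd]
    · rw [List.takeWhile_cons_of_neg (by simp [hd]),
        List.dropWhile_cons_of_neg (by simp [hd])]
      simp

-- splitB on a group-starting character of category 2..5
theorem splitB_group (c : Char) (rest : List Char) (k : Nat) (h : catB c = k)
    (h2 : 2 ≤ k) (h5 : k ≤ 5) :
    splitB (c :: rest) =
      String.mk (c :: rest.takeWhile (fun d => catB d == k)) ::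
        splitB (rest.dropWhile (fun d => catB d == k)) := by
  rw [splitB.eq_def]
  simp only [h]
  have e1 : (k == 1) = false := by simp; omega
  have e0 : (k == 0) = false := by simp; omega
  have e6 : (k == 6) = false := by simp; omega
  rw [e1, e0, e6]
  simp

theorem splitA_eq_splitB (cs : List Char) (h : cs.all knownChar = true) :
    splitA cs = splitB cs := by
  induction cs using splitA.induct with
  | case1 =>
    rw [splitA, splitB.eq_def]
  | case2 c rest h1 ih =>
    rw [splitA]
    simp only [h1, if_true]
    rw [splitB_space c rest h1, ih (all_tail c rest _ h)]
  | case3 c rest h1 hdot ih =>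
    rw [splitA]
    simp only [h1, hdot, if_true, if_false, Bool.false_eq_true]
    have hk : catB c = 1 := by simp [catB, h1, hdot]
    rw [splitB_one c rest hk, ih (all_tail c rest _ h)]
  | case4 c rest h1 hdot h2 ih =>
    rw [splitA]
    simp only [h1, hdot, h2, if_false, Bool.false_eq_true, dif_pos]
    have hk : catB c = 2 := by
      have h2' := h2
      simp only [isLogicChar, Bool.or_eq_true, beq_iff_eq] at h2'
      rcases h2' with rfl | rfl <;> decide
    rw [splitB_group c rest 2 hk (by omega) (by omega), cat_logic,
      List.takeWhile_cons_of_pos h2, List.dropWhile_cons_of_pos h2] at *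
    rw [ih (all_drop _ _ _ (all_tail c rest _ h))]
  | case5 c rest h1 hdot h2 h3 ih =>
    rw [splitA]
    simp only [h1, hdot, h2, h3, if_false, Bool.false_eq_true, dif_pos]
    have hk : catB c = 3 := by
      have h3' := h3
      simp only [isComparisionChar, Bool.or_eq_true, beq_iff_eq] at h3'
      rcases h3' with ((rfl | rfl) | rfl) | rfl <;> decide
    rw [splitB_group c rest 3 hk (by omega) (by omega), cat_cmp,
      List.takeWhile_cons_of_pos h3, List.dropWhile_cons_of_pos h3] at *
    rw [ih (all_drop _ _ _ (all_tail c rest _ h))]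
    simp
  | case6 c rest h1 hdot h2 h3 h4 ih =>
    rw [splitA]
    simp only [h1, hdot, h2, h3, h4, if_false, Bool.false_eq_true, dif_pos]
    have hk : catB c = 4 := cat_of_digit c h4
    rw [splitB_group c rest 4 hk (by omega) (by omega), cat_digit,
      List.takeWhile_cons_of_pos h4, List.dropWhile_cons_of_pos h4] at *
    rw [ih (all_drop _ _ _ (all_tail c rest _ h))]
    simp
  | case7 c rest h1 hdot h2 h3 h4 h5 ih =>
    rw [splitA]
    simp only [h1, hdot, h2, h3, h4, h5, if_false, Bool.false_eq_true, dif_pos]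
    have hk : catB c = 5 := cat_of_alpha c h5
    rw [splitB_group c rest 5 hk (by omega) (by omega), cat_alpha,
      List.takeWhile_cons_of_pos h5, List.dropWhile_cons_of_pos h5] at *
    rw [ih (all_drop _ _ _ (all_tail c rest _ h))]
    simp
  | case8 c rest h1 hdot h2 h3 h4 h5 =>
    exfalso
    have hc : knownChar c = true := by simp_all [List.all_cons]
    simp_all [knownChar, isLogicChar, isComparisionChar]

-- ===== splitB = B's mark-and-split pipeline =====

theorem splitB_nil : splitB [] = [] := by rw [splitB.eq_def]

-- tokens xs = the pipeline applied to an already-marked char list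
def tokens (xs : List Char) : List String :=
  ((xs.splitOn (Char.ofNat 0)).filter keepTok).map String.mk

theorem alt_eq_tokens (value : String) :
    splitCondition_alt value = tokens (markedB value.toList none) := rfl

theorem dom_ne_nul (c : Char) (h : pvDomChar c = true) : (c == Char.ofNat 0) = false := by
  simp only [pvDomChar, Bool.or_eq_true, Bool.and_eq_true, decide_eq_true_eq, beq_iff_eq] at h
  rw [beq_eq_false_iff_ne]
  rintro rfl
  simp at h

theorem markedB_none_cons (c : Char) (rest : List Char) :
    markedB (c :: rest) none = Char.ofNat 0 :: c :: markedB rest (some (catB c)) := by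
  rw [markedB]
  simp

-- prev is irrelevant when the head's label differs from it
theorem markedB_ne (c : Char) (rest : List Char) (p : Nat) (h : catB c ≠ p) :
    markedB (c :: rest) (some p) = markedB (c :: rest) none := by
  rw [markedB, markedB]
  have : (some p ≠ some (catB c) ∨ catB c ≤ 1) := Or.inl (by simpa using fun e => h e.symm)
  rw [if_pos this, if_pos (Or.inl (by simp))]

-- prev is irrelevant after a space or '.()' label (a separator is spliced regardless)
theorem markedB_le1 (cs : List Char) (p : Nat) (hp : p ≤ 1) :
    markedB cs (some p) = markedB cs none := by
  cases cs with
  | nil => rfl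
  | cons c rest =>
    by_cases h : catB c = p
    · rw [markedB, markedB]
      rw [if_pos (Or.inr (h ▸ hp)), if_pos (Or.inl (by simp))]
    · exact markedB_ne c rest p h

-- a run of label k ≥ 2 is copied with no separators, resetting prev at its end
theorem markedB_run (xs : List Char) (k : Nat) (hk : 2 ≤ k) :
    markedB xs (some k) =
      xs.takeWhile (fun d => catB d == k) ++ markedB (xs.dropWhile (fun d => catB d == k)) none := by
  induction xs with
  | nil => rfl
  | cons x xs' ih =>
    by_cases h : catB x = k
    · rw [List.takeWhile_cons_of_pos (by simp [h]), List.dropWhile_cons_of_pos (by simp [h])]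
      rw [markedB]
      rw [if_neg (by simp [h]; omega)]
      rw [h, ih]
      simp
    · rw [List.takeWhile_cons_of_neg (by simp [h]), List.dropWhile_cons_of_neg (by simp [h])]
      rw [markedB_ne x xs' k h]
      simp

-- markedB from a fresh start is empty or separator-headed
theorem markedB_shape (cs : List Char) :
    markedB cs none = [] ∨ ∃ ys, markedB cs none = Char.ofNat 0 :: ys := by
  cases cs with
  | nil => exact Or.inl rfl
  | cons c rest => exact Or.inr ⟨_, markedB_none_cons c rest⟩

theorem tokens_nil : tokens [] = [] := by
  simp [tokens, List.splitOn, List.splitOnP_nil, keepTok]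

theorem tokens_sep (rest : List Char) : tokens (Char.ofNat 0 :: rest) = tokens rest := by
  simp [tokens, List.splitOn, List.splitOnP_cons, keepTok]

-- a separator-free group followed by nothing or a separator contributes its own piece
theorem tokens_group (g ms : List Char) (hg : ∀ x ∈ g, (x == Char.ofNat 0) = false)
    (hms : ms = [] ∨ ∃ ys, ms = Char.ofNat 0 :: ys) :
    tokens (g ++ ms) = (if keepTok g then [String.mk g] else []) ++ tokens ms := by
  have hg' : ∀ x ∈ g, ¬((x == Char.ofNat 0) = true) := fun x hx => by simp [hg x hx]
  rcases hms with rfl | ⟨ys, rfl⟩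
  · rw [List.append_nil, tokens_nil, List.append_nil]
    simp only [tokens, List.splitOn]
    rw [List.splitOnP_eq_single (fun x => x == Char.ofNat 0) g hg']
    by_cases h : keepTok g = true <;> simp [h]
  · rw [tokens_sep]
    simp only [tokens, List.splitOn]
    rw [List.splitOnP_first (fun x => x == Char.ofNat 0) g hg' (Char.ofNat 0) (by simp) ys]
    rw [List.filter_cons]
    by_cases h : keepTok g = true <;> simp [h]

theorem splitB_eq_tokens : ∀ (n : Nat) (cs : List Char), cs.length ≤ n →
    cs.all knownChar = true → cs.all pvDomChar = true →
    splitB cs = tokens (markedB cs none) := by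
  intro n
  induction n with
  | zero =>
    intro cs hlen _ _
    have : cs = [] := List.length_eq_zero_iff.mp (Nat.le_zero.mp hlen)
    subst this
    rw [splitB_nil, show markedB [] none = [] from rfl, tokens_nil]
  | succ n ih =>
    intro cs hlen hknown hdom
    cases cs with
    | nil => rw [splitB_nil, show markedB [] none = [] from rfl, tokens_nil]
    | cons c rest =>
      have hlen' : rest.length ≤ n := by simpa using hlen
      have hkc : knownChar c = true := by simp_all [List.all_cons]
      have hdc : pvDomChar c = true := by simp_all [List.all_cons]
      rw [markedB_none_cons, tokens_sep]
      have hcat6 : catB c ≠ 6 := by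
        simp only [knownChar, Bool.or_eq_true, beq_iff_eq] at hkc
        rcases hkc with (((((((((((hs | rfl) | rfl) | rfl) | rfl) | rfl) | rfl) | rfl) | rfl) | rfl) | hd) | ha)
        · simp [catB, hs]
        all_goals try decide
        · rw [cat_of_digit c hd]; omega
        · rw [cat_of_alpha c ha]; omega
      by_cases h0 : catB c = 0
      · -- whitespace: its singleton group is dropped on both sides
        have hs : PySem.Chars.isspace c = true := by
          by_contra hs
          rw [Bool.not_eq_true] at hs
          unfold catB at h0
          rw [hs] at h0
          split_ifs at h0 <;> simp_all
        rw [splitB_space c rest hs, h0, markedB_le1 rest 0 (by omega)]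
        show _ = tokens (([c] : List Char) ++ markedB rest none)
        rw [tokens_group [c] _ (by intro x hx; simp at hx; rw [hx]; exact dom_ne_nul c hdc)
          (markedB_shape rest)]
        rw [if_neg (by simp [keepTok, h0])]
        rw [List.nil_append]
        exact ih rest hlen' (all_tail _ _ _ hknown) (all_tail _ _ _ hdom)
      by_cases h1 : catB c = 1
      · -- '.()': singleton token
        rw [splitB_one c rest h1, h1, markedB_le1 rest 1 (by omega)]
        show _ = tokens (([c] : List Char) ++ markedB rest none)
        rw [tokens_group [c] _ (by intro x hx; simp at hx; rw [hx]; exact dom_ne_nul c hdc)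
          (markedB_shape rest)]
        rw [if_pos (by simp [keepTok, h0])]
        rw [ih rest hlen' (all_tail _ _ _ hknown) (all_tail _ _ _ hdom)]
        rfl
      · -- a run of label 2..5
        have hk2 : 2 ≤ catB c := by omega
        have hk5 : catB c ≤ 5 := by
          have h6 : catB c ≤ 6 := by unfold catB; split_ifs <;> omega
          omega
        rw [splitB_group c rest (catB c) rfl hk2 hk5]
        rw [markedB_run rest (catB c) hk2]
        rw [show (c :: (rest.takeWhile (fun d => catB d == catB c) ++
            markedB (rest.dropWhile (fun d => catB d == catB c)) none)) =
          (c :: rest.takeWhile (fun d => catB d == catB c)) ++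
            markedB (rest.dropWhile (fun d => catB d == catB c)) none from rfl]
        have hgrp : ∀ x ∈ c :: rest.takeWhile (fun d => catB d == catB c),
            (x == Char.ofNat 0) = false := by
          intro x hx
          rcases List.mem_cons.mp hx with rfl | hx
          · exact dom_ne_nul x hdc
          · have : x ∈ rest := (List.takeWhile_sublist _).subset hx
            have : pvDomChar x = true := by
              have := all_tail _ _ _ hdom
              rw [List.all_eq_true] at this
              exact this x ‹x ∈ rest›
            exact dom_ne_nul x this
        rw [tokens_group _ _ hgrp (markedB_shape _)]
        rw [if_pos (by simp [keepTok, h0])]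
        have hlt : (rest.dropWhile (fun d => catB d == catB c)).length ≤ n :=
          le_trans (List.length_dropWhile_le _ _) hlen'
        rw [ih _ hlt (all_drop _ _ _ (all_tail _ _ _ hknown))
          (all_drop _ _ _ (all_tail _ _ _ hdom))]
        rfl

-- ===== VERDICT (by name: the statement is the Claim_ definition above) =====
theorem splitCondition_spec : Claim_equal_splitCondition := by
  intro value hdom hpre
  unfold Spec_splitCondition splitCondition
  rw [alt_eq_tokens]
  rw [splitA_eq_splitB value.toList hpre]
  exact splitB_eq_tokens value.toList.length value.toList le_rfl hpre hdom
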